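-- pv_equiv track=rewrite | github.com/pablotoledo/sumer-ia | component_b_streamlit/src/streamlit_interface/core/agent_interface.py | _extract_qa_content
-- ===== SOURCE A (Python) =====
-- def _extract_qa_content(content: str) -> str:
--     """Extrae la sección Q&A de un segmento procesado."""
--     lines = content.split('\n')
--     qa_section = []
--     in_qa_section = False
--
--     for line in lines:
--         if any(keyword in line.lower() for keyword in ['pregunta', 'respuesta', '¿', '?', 'q&a']):
--             in_qa_section = True
--
--         if in_qa_section:
--             qa_section.append(line)
--
--     return '\n'.join(qa_section) if qa_section else ""
-- ===== SOURCE B (Python) =====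
-- def _extract_qa_content(content: str) -> str:
--     """Extrae la sección Q&A de un segmento procesado."""
--     lines = content.split('\n')
--     keywords = ['pregunta', 'respuesta', '¿', '?', 'q&a']
--     idx = next((i for i, line in enumerate(lines)
--                 if any(keyword in line.lower() for keyword in keywords)), None)
--     return '\n'.join(lines[idx:]) if idx is not None else ""
-- ===== Notes on version B (the rewrite author's own statement) =====
-- stated objective: simpler
-- what changed: Replaces the stateful flag-and-append loop with a locate-then-slice decomposition: find the first line containing a keyword, then return the joined suffix of lines from that index.
import Mathlib
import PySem

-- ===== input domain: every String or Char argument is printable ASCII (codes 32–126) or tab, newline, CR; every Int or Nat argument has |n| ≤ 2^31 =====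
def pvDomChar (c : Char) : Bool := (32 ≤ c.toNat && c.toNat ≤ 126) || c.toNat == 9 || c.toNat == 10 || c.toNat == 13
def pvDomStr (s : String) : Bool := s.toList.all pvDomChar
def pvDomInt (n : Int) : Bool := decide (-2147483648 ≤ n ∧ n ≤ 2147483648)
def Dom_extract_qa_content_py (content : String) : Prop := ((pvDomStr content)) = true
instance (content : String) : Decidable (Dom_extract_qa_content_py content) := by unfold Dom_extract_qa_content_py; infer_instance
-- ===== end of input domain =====

-- B replaces A's stateful flag-and-append loop by finding the first keyword line and joining the suffix (objective: simpler).

-- shared in both Pythons: any(keyword in line.lower() for keyword in ['pregunta', 'respuesta', '¿', '?', 'q&a'])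
def qaKeywordLine (line : String) : Bool :=
  ["pregunta", "respuesta", "¿", "?", "q&a"].any
    (fun keyword => PySem.Str.isIn keyword (PySem.Str.lower line))

-- content.split('\n'): split? is none only for sep = "", so getD [] never fires
def qaLines (content : String) : List String :=
  (PySem.Str.split? content "\n").getD []

-- ===== PORT A =====
-- one iteration of A's loop body on the state (qa_section, in_qa_section)
def stepA (st : List String × Bool) (line : String) : List String × Bool :=
  let in_qa_section := if qaKeywordLine line then true else st.2
  let qa_section := if in_qa_section then st.1 ++ [line] else st.1
  (qa_section, in_qa_section)

def extract_qa_content_py (content : String) : String :=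
  let lines := qaLines content
  let st := lines.foldl stepA ([], false)
  if st.1 ≠ [] then PySem.Str.join "\n" st.1 else ""

-- ===== PORT B =====
-- first-match index via findIdx? (the Python's next(... enumerate ...)), then join of lines[idx:]
def extract_qa_content_py_alt (content : String) : String :=
  let lines := qaLines content
  match lines.findIdx? qaKeywordLine with
  | some idx => PySem.Str.join "\n" (lines.drop idx)   -- lines[idx:] with 0 ≤ idx < len(lines)
  | none => ""

-- ===== PRECONDITION & SPEC =====
def Spec_extract_qa_content_py (content : String) (out : String) : Prop := out = extract_qa_content_py_alt content
instance (content : String) (out : String) : Decidable (Spec_extract_qa_content_py content out) := by unfold Spec_extract_qa_content_py; infer_instance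

-- ===== CLAIM (what is proved, stated in full; the proofs are below) =====
def Claim_equal_extract_qa_content_py : Prop := ∀ (content : String), Dom_extract_qa_content_py content → Spec_extract_qa_content_py content (extract_qa_content_py content)

-- ===== LEMMAS AND PROOFS =====

-- once the flag is set, the loop appends every remaining line
theorem foldA_true (ls : List String) (acc : List String) :
    ls.foldl stepA (acc, true) = (acc ++ ls, true) := by
  induction ls generalizing acc with
  | nil => simp
  | cons l ls ih => simp [stepA, ih]

-- the loop from the initial state collects exactly the suffix from the first matching line
theorem foldA_eq_findIdx (ls : List String) :
    ls.foldl stepA ([], false)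
      = match ls.findIdx? qaKeywordLine with
        | some idx => (ls.drop idx, true)
        | none => ([], false) := by
  induction ls with
  | nil => simp
  | cons l ls ih =>
    simp only [List.foldl_cons, List.findIdx?_cons]
    by_cases h : qaKeywordLine l
    · have h1 : stepA ([], false) l = ([l], true) := by simp [stepA, h]
      rw [h1, foldA_true, h]
      simp
    · have h1 : stepA ([], false) l = ([], false) := by simp [stepA, h]
      rw [h1, ih]
      simp only [h]
      cases hf : ls.findIdx? qaKeywordLine <;> simp

-- ===== VERDICT (by name: the statement is the Claim_ definition above) =====
theorem extract_qa_content_py_spec : Claim_equal_extract_qa_content_py := by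
  intro content _
  unfold Spec_extract_qa_content_py extract_qa_content_py extract_qa_content_py_alt
  simp only [foldA_eq_findIdx]
  cases hf : (qaLines content).findIdx? qaKeywordLine with
  | none => simp
  | some idx =>
    have hlt : idx < (qaLines content).length := by
      exact (List.findIdx?_eq_some_iff_getElem.mp hf).1
    have hne : (qaLines content).drop idx ≠ [] := by
      simp [List.drop_eq_nil_iff]; omega
    simp [hne]
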